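-- pv_equiv track=rewrite | github.com/benquick123/code-profiling | code/batch-1/dn5/Z-65.py | custva
-- ===== SOURCE A (Python) =====
-- def avtor(tvit):
--     ime=tvit[0:tvit.find(":")]
--     return ime
--
-- def izloci_besedo(beseda):
--     for e in beseda:
--         if e.isalnum()==False:
--             beseda=beseda.lstrip(e[0])
--     for i in beseda[::-1]:
--         if i.isalnum()==False:
--             beseda = beseda.rstrip(i[-1])
--     return beseda
--
-- def custva(tviti, hashtagi):
--     avtorji=[]
--     for hash in hashtagi:
--         for tvit in tviti:
--             for beseda in tvit.split():
--                 if hash==izloci_besedo(beseda):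
--                     ime=avtor(tvit)
--                     if ime not in avtorji:
--                         avtorji.append(ime)
--
--     avtorji.sort()
--     return avtorji
-- ===== SOURCE B (Python) =====
-- def avtor(tvit):
--     ime=tvit[0:tvit.find(":")]
--     return ime
--
-- def izloci_besedo(beseda):
--     for e in beseda:
--         if e.isalnum()==False:
--             beseda=beseda.lstrip(e[0])
--     for i in beseda[::-1]:
--         if i.isalnum()==False:
--             beseda = beseda.rstrip(i[-1])
--     return beseda
--
-- def custva(tviti, hashtagi):
--     index = {}
--     for tvit in tviti:
--         ime = avtor(tvit)
--         for beseda in tvit.split():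
--             index.setdefault(izloci_besedo(beseda), set()).add(ime)
--     rezultat = set()
--     for hash in hashtagi:
--         rezultat |= index.get(hash, set())
--     return sorted(rezultat)
-- ===== Notes on version B (the rewrite author's own statement) =====
-- stated objective: faster
-- what changed: B builds a word->authors dict index in one pass over all tweets (cleaning each word once), then answers each hashtag by a dict lookup and set union, instead of A's rescan of every tweet/word per hashtag.
import Mathlib
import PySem

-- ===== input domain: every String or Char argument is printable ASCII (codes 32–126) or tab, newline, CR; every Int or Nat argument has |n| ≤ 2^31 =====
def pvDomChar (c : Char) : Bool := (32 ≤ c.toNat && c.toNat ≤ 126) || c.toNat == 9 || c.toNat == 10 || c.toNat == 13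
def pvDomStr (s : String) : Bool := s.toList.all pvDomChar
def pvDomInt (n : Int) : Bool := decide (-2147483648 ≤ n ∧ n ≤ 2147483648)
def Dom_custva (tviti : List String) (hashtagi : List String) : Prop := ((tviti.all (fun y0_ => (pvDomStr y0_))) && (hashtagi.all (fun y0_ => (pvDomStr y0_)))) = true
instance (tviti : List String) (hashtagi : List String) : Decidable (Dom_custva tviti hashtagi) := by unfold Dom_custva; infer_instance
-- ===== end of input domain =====

-- B builds a word->authors dict index in one pass over the tweets and answers each hashtag by
-- a lookup + set union, instead of A's rescan of every tweet and word per hashtag (faster).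

-- ===== PORT A =====
-- shared helpers, identical in Source A and Source B: avtor and izloci_besedo
def pvAvtor (tvit : String) : String :=
  PySem.Str.slice tvit (some 0) (some (PySem.Str.find tvit ":"))

-- hand port of beseda.lstrip(c) / beseda.rstrip(c) for a SINGLE strip character c:
-- exact (Python strips every leading/trailing occurrence of c)
def pvLstrip1 (cs : List Char) (c : Char) : List Char := cs.dropWhile (· == c)
def pvRstrip1 (cs : List Char) (c : Char) : List Char := (cs.reverse.dropWhile (· == c)).reverse

def pvClean (beseda : String) : String :=
  let cs := beseda.toList
  let l1 := cs.foldl (fun acc e => if PySem.Chars.isalnum e = false then pvLstrip1 acc e else acc) cs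
  let l2 := l1.reverse.foldl (fun acc i => if PySem.Chars.isalnum i = false then pvRstrip1 acc i else acc) l1
  String.ofList l2

def custva (tviti : List String) (hashtagi : List String) : List String :=
  let avtorji := hashtagi.foldl (fun acc hash =>
    tviti.foldl (fun acc tvit =>
      (PySem.Str.split₀ tvit).foldl (fun acc beseda =>
        if hash == pvClean beseda then
          let ime := pvAvtor tvit
          if acc.contains ime then acc else acc ++ [ime]
        else acc) acc) acc) ([] : List String)
  PySem.List.sorted avtorji (fun x => x) false

-- ===== PORT B =====
-- index.setdefault(w, set()).add(ime): dict.insert overwrites in place / appends at end, as setdefault+add does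
def pvIndex (tviti : List String) : PySem.Dict String (PySem.Set String) :=
  tviti.foldl (fun idx tvit =>
    let ime := pvAvtor tvit
    (PySem.Str.split₀ tvit).foldl (fun idx beseda =>
      let w := pvClean beseda
      idx.insert w (PySem.Set.add (idx.getD w PySem.Set.empty) ime)) idx) PySem.Dict.empty

def custva_alt (tviti : List String) (hashtagi : List String) : List String :=
  let index := pvIndex tviti
  let rezultat := hashtagi.foldl (fun acc hash =>
    PySem.Set.union acc (index.getD hash PySem.Set.empty)) PySem.Set.empty
  PySem.List.sorted rezultat (fun x => x) false

-- ===== PRECONDITION & SPEC =====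
def Spec_custva (tviti : List String) (hashtagi : List String) (out : List String) : Prop := out = custva_alt tviti hashtagi
instance (tviti : List String) (hashtagi : List String) (out : List String) : Decidable (Spec_custva tviti hashtagi out) := by unfold Spec_custva; infer_instance

-- ===== CLAIM (what is proved, stated in full; the proofs are below) =====
def Claim_equal_custva : Prop := ∀ (tviti : List String) (hashtagi : List String), Dom_custva tviti hashtagi → Spec_custva tviti hashtagi (custva tviti hashtagi)

-- ===== LEMMAS AND PROOFS =====

-- A-side: the innermost word loop adds pvAvtor tvit when some word cleans to hash
theorem memA3 (ws : List String) (x hash v : String) : ∀ acc : List String,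
    (x ∈ ws.foldl (fun acc b =>
        if hash == pvClean b then (if acc.contains v then acc else acc ++ [v]) else acc) acc
      ↔ x ∈ acc ∨ (x = v ∧ ∃ b ∈ ws, hash = pvClean b)) := by
  induction ws with
  | nil => simp
  | cons b t ih =>
    intro acc
    rw [List.foldl_cons, ih]
    by_cases hb : hash = pvClean b
    · by_cases hc : v ∈ acc
      · simp [hb, hc]
        constructor
        · rintro (hx | ⟨rfl, _⟩)
          · exact Or.inl hx
          · exact Or.inr rfl
        · rintro (hx | rfl)
          · exact Or.inl hx
          · exact Or.inl hc
      · simp [hb, hc]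
        tauto
    · simp [hb]

theorem nodupA3 (ws : List String) (hash v : String) : ∀ acc : List String, acc.Nodup →
    (ws.foldl (fun acc b =>
        if hash == pvClean b then (if acc.contains v then acc else acc ++ [v]) else acc) acc).Nodup := by
  induction ws with
  | nil => intro acc h; simpa using h
  | cons b t ih =>
    intro acc h
    rw [List.foldl_cons]
    refine ih _ ?_
    by_cases hb : hash = pvClean b
    · by_cases hc : v ∈ acc
      · simpa [hb, hc] using h
      · simp [hb, hc, List.nodup_append, h]
        exact fun a ha he => hc (he ▸ ha)
    · simpa [hb] using h

-- A-side: the tweet loop for one hashtag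
theorem memA2 (tviti : List String) (x hash : String) : ∀ acc : List String,
    (x ∈ tviti.foldl (fun acc tvit =>
        (PySem.Str.split₀ tvit).foldl (fun acc beseda =>
          if hash == pvClean beseda then
            (if acc.contains (pvAvtor tvit) then acc else acc ++ [pvAvtor tvit]) else acc) acc) acc
      ↔ x ∈ acc ∨ ∃ t ∈ tviti, x = pvAvtor t ∧ ∃ b ∈ PySem.Str.split₀ t, hash = pvClean b) := by
  induction tviti with
  | nil => simp
  | cons t ts ih =>
    intro acc
    rw [List.foldl_cons, ih, memA3]
    simp only [List.mem_cons]
    constructor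
    · rintro ((hx | ⟨rfl, hb⟩) | ⟨t', ht', hrest⟩)
      · exact Or.inl hx
      · exact Or.inr ⟨t, Or.inl rfl, rfl, hb⟩
      · exact Or.inr ⟨t', Or.inr ht', hrest⟩
    · rintro (hx | ⟨t', ht' | ht', hrest⟩)
      · exact Or.inl (Or.inl hx)
      · subst ht'; exact Or.inl (Or.inr ⟨hrest.1, hrest.2⟩)
      · exact Or.inr ⟨t', ht', hrest⟩

theorem nodupA2 (tviti : List String) (hash : String) : ∀ acc : List String, acc.Nodup →
    (tviti.foldl (fun acc tvit =>
        (PySem.Str.split₀ tvit).foldl (fun acc beseda =>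
          if hash == pvClean beseda then
            (if acc.contains (pvAvtor tvit) then acc else acc ++ [pvAvtor tvit]) else acc) acc) acc).Nodup := by
  induction tviti with
  | nil => intro acc h; simpa using h
  | cons t ts ih => intro acc h; exact ih _ (nodupA3 _ _ _ _ h)

-- A-side: full loop
theorem memA (tviti hashtagi : List String) (x : String) : ∀ acc : List String,
    (x ∈ hashtagi.foldl (fun acc hash =>
        tviti.foldl (fun acc tvit =>
          (PySem.Str.split₀ tvit).foldl (fun acc beseda =>
            if hash == pvClean beseda then
              (if acc.contains (pvAvtor tvit) then acc else acc ++ [pvAvtor tvit]) else acc) acc) acc) acc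
      ↔ x ∈ acc ∨ ∃ h ∈ hashtagi, ∃ t ∈ tviti, x = pvAvtor t ∧ ∃ b ∈ PySem.Str.split₀ t, h = pvClean b) := by
  induction hashtagi with
  | nil => simp
  | cons h hs ih =>
    intro acc
    rw [List.foldl_cons, ih, memA2]
    simp only [List.mem_cons]
    constructor
    · rintro ((hx | hrest) | ⟨h', hh', hrest⟩)
      · exact Or.inl hx
      · exact Or.inr ⟨h, Or.inl rfl, hrest⟩
      · exact Or.inr ⟨h', Or.inr hh', hrest⟩
    · rintro (hx | ⟨h', hh' | hh', hrest⟩)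
      · exact Or.inl (Or.inl hx)
      · subst hh'; exact Or.inl (Or.inr hrest)
      · exact Or.inr ⟨h', hh', hrest⟩

theorem nodupA (tviti hashtagi : List String) : ∀ acc : List String, acc.Nodup →
    (hashtagi.foldl (fun acc hash =>
        tviti.foldl (fun acc tvit =>
          (PySem.Str.split₀ tvit).foldl (fun acc beseda =>
            if hash == pvClean beseda then
              (if acc.contains (pvAvtor tvit) then acc else acc ++ [pvAvtor tvit]) else acc) acc) acc) acc).Nodup := by
  induction hashtagi with
  | nil => intro acc h; simpa using h
  | cons h hs ih => intro acc h; exact ih _ (nodupA2 _ _ _ h)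

-- getD of insert, split by key equality
theorem getD_insert_cases (idx : PySem.Dict String (PySem.Set String)) (k w : String) (s : PySem.Set String) :
    (idx.insert k s).getD w PySem.Set.empty
      = if w = k then s else idx.getD w PySem.Set.empty := by
  by_cases h : w = k
  · subst h; simp [PySem.Dict.getD_insert_self]
  · simp [h, PySem.Dict.getD_insert_of_ne _ _ _ h]

-- B-side: the word loop of pvIndex
theorem memIdxW (ws : List String) (w x v : String) : ∀ idx : PySem.Dict String (PySem.Set String),
    (x ∈ (ws.foldl (fun idx b =>
        idx.insert (pvClean b) (PySem.Set.add (idx.getD (pvClean b) PySem.Set.empty) v)) idx).getD w PySem.Set.empty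
      ↔ x ∈ idx.getD w PySem.Set.empty ∨ (x = v ∧ ∃ b ∈ ws, w = pvClean b)) := by
  induction ws with
  | nil => simp
  | cons b t ih =>
    intro idx
    rw [List.foldl_cons, ih, getD_insert_cases]
    by_cases hw : w = pvClean b
    · subst hw
      rw [if_pos rfl]
      rw [PySem.Set.mem_add]
      simp only [List.mem_cons]
      constructor
      · rintro ((hx | rfl) | ⟨rfl, b', hb', he⟩)
        · exact Or.inl hx
        · exact Or.inr ⟨rfl, b, Or.inl rfl, rfl⟩
        · exact Or.inr ⟨rfl, b', Or.inr hb', he⟩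
      · rintro (hx | ⟨rfl, _⟩)
        · exact Or.inl (Or.inl hx)
        · exact Or.inl (Or.inr rfl)
    · rw [if_neg hw]
      simp only [List.mem_cons]
      constructor
      · rintro (hx | ⟨rfl, b', hb', he⟩)
        · exact Or.inl hx
        · exact Or.inr ⟨rfl, b', Or.inr hb', he⟩
      · rintro (hx | ⟨rfl, b', hb' | hb', he⟩)
        · exact Or.inl hx
        · exact absurd (hb' ▸ he) hw
        · exact Or.inr ⟨rfl, b', hb', he⟩

-- B-side: the full index
theorem memIdx (tviti : List String) (w x : String) : ∀ idx : PySem.Dict String (PySem.Set String),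
    (x ∈ (tviti.foldl (fun idx tvit =>
        (PySem.Str.split₀ tvit).foldl (fun idx beseda =>
          idx.insert (pvClean beseda) (PySem.Set.add (idx.getD (pvClean beseda) PySem.Set.empty) (pvAvtor tvit))) idx) idx).getD w PySem.Set.empty
      ↔ x ∈ idx.getD w PySem.Set.empty ∨ ∃ t ∈ tviti, x = pvAvtor t ∧ ∃ b ∈ PySem.Str.split₀ t, w = pvClean b) := by
  induction tviti with
  | nil => simp
  | cons t ts ih =>
    intro idx
    rw [List.foldl_cons, ih, memIdxW]
    simp only [List.mem_cons]
    constructor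
    · rintro ((hx | ⟨rfl, hb⟩) | ⟨t', ht', hrest⟩)
      · exact Or.inl hx
      · exact Or.inr ⟨t, Or.inl rfl, rfl, hb⟩
      · exact Or.inr ⟨t', Or.inr ht', hrest⟩
    · rintro (hx | ⟨t', ht' | ht', hrest⟩)
      · exact Or.inl (Or.inl hx)
      · subst ht'; exact Or.inl (Or.inr ⟨hrest.1, hrest.2⟩)
      · exact Or.inr ⟨t', ht', hrest⟩

-- B-side: the union loop over hashtagi
theorem memU (hashtagi : List String) (x : String) (index : PySem.Dict String (PySem.Set String)) :
    ∀ acc : PySem.Set String,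
    (x ∈ hashtagi.foldl (fun acc hash => PySem.Set.union acc (index.getD hash PySem.Set.empty)) acc
      ↔ x ∈ acc ∨ ∃ h ∈ hashtagi, x ∈ index.getD h PySem.Set.empty) := by
  induction hashtagi with
  | nil => simp
  | cons h hs ih =>
    intro acc
    rw [List.foldl_cons, ih, PySem.Set.mem_union]
    simp only [List.mem_cons]
    constructor
    · rintro ((hx | hx) | ⟨h', hh', hx⟩)
      · exact Or.inl hx
      · exact Or.inr ⟨h, Or.inl rfl, hx⟩
      · exact Or.inr ⟨h', Or.inr hh', hx⟩
    · rintro (hx | ⟨h', hh' | hh', hx⟩)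
      · exact Or.inl (Or.inl hx)
      · subst hh'; exact Or.inl (Or.inr hx)
      · exact Or.inr ⟨h', hh', hx⟩

theorem nodupU (hashtagi : List String) (index : PySem.Dict String (PySem.Set String)) :
    ∀ acc : PySem.Set String, acc.Nodup →
    (hashtagi.foldl (fun acc hash => PySem.Set.union acc (index.getD hash PySem.Set.empty)) acc).Nodup := by
  induction hashtagi with
  | nil => intro acc h; simpa using h
  | cons h hs ih => intro acc hacc; exact ih _ (PySem.Set.nodup_union _ _ hacc)

-- ===== VERDICT (by name: the statement is the Claim_ definition above) =====
theorem custva_spec : Claim_equal_custva := by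
  intro tviti hashtagi _
  unfold Spec_custva custva custva_alt pvIndex
  apply (PySem.List.sorted_id_eq_sorted_id_iff_perm _ _).mpr
  apply (List.perm_ext_iff_of_nodup ?_ ?_).mpr
  · intro x
    rw [memA, memU]
    constructor
    · rintro (hx | ⟨h, hh, t, ht, rfl, b, hb, rfl⟩)
      · exact absurd hx List.not_mem_nil
      · refine Or.inr ⟨_, hh, ?_⟩
        rw [memIdx]
        exact Or.inr ⟨t, ht, rfl, b, hb, rfl⟩
    · rintro (hx | ⟨h, hh, hx⟩)
      · exact absurd hx (by simp [PySem.Set.empty])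
      · rw [memIdx] at hx
        rcases hx with hx | ⟨t, ht, rfl, b, hb, rfl⟩
        · exact absurd hx (by simp [PySem.Dict.empty, PySem.Dict.getD, PySem.Dict.get?, PySem.Set.empty])
        · exact Or.inr ⟨_, hh, t, ht, rfl, b, hb, rfl⟩
  · exact nodupA _ _ _ List.nodup_nil
  · refine nodupU _ _ _ ?_
    simp [PySem.Set.empty]
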